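-- pv_equiv track=rewrite | github.com/cmattoon/foobar | the-cake-is-not-a-lie/solution.py | answer
-- ===== SOURCE A (Python) =====
-- def answer(s):
--     L = len(s)
--     for i in range(L):
--         sub = s[:i]
--         l = len(sub)
--         occurs = s.count(sub)
--         if occurs * l == L:
--             return occurs
--     return 1
-- ===== SOURCE B (Python) =====
-- def answer(s):
--     L = len(s)
--     for d in range(1, L + 1):
--         if L % d == 0 and s == s[:d] * (L // d):
--             return L // d
--     return 1
-- ===== Notes on version B (the rewrite author's own statement) =====
-- stated objective: faster
-- what changed: Instead of scanning every prefix length and counting its non-overlapping occurrences with s.count (O(L) work per prefix), B tries only the divisors d of L in increasing order and checks directly whether s equals its length-d prefix repeated L//d times.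
import Mathlib
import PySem

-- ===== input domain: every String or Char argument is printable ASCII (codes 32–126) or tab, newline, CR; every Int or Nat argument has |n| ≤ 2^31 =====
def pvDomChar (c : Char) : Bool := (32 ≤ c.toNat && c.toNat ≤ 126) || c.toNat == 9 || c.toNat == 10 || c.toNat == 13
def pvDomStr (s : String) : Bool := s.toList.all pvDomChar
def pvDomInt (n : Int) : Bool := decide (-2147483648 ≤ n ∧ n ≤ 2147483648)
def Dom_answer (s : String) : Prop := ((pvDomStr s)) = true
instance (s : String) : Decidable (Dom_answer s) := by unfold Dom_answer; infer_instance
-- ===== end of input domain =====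

-- B replaces A's scan over every prefix length (each with an O(L) s.count pass) by a
-- scan over the divisors of L only, comparing s with its prefix repeated; objective: faster.

-- ===== PORT A =====
-- the 'for i in range(L)' loop with early return; s[:i] for 0 ≤ i is cs.take i
def answerLoopA (cs : List Char) (L : Nat) : List Nat → Int
  | [] => 1
  | i :: rest =>
    let sub := cs.take i
    let l := sub.length
    let occurs := PySem.Chars.count cs sub
    if occurs * l = L then (occurs : Int) else answerLoopA cs L rest

def answer (s : String) : Int :=
  answerLoopA s.toList s.toList.length (List.range s.toList.length)

-- ===== PORT B =====
-- s[:d] * (L // d) : Python string repetition, ported by hand as flatten of replicate (exact)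
def answerLoopB (cs : List Char) (L : Nat) : List Nat → Int
  | [] => 1
  | d :: rest =>
    if L % d = 0 ∧ cs = (List.replicate (L / d) (cs.take d)).flatten then ((L / d : Nat) : Int)
    else answerLoopB cs L rest

def answer_alt (s : String) : Int :=
  answerLoopB s.toList s.toList.length (List.range' 1 s.toList.length)

-- ===== PRECONDITION & SPEC =====
def Spec_answer (s : String) (out : Int) : Prop := out = answer_alt s
instance (s : String) (out : Int) : Decidable (Spec_answer s out) := by unfold Spec_answer; infer_instance

-- ===== CLAIM (what is proved, stated in full; the proofs are below) =====
def Claim_equal_answer : Prop := ∀ (s : String), Dom_answer s → Spec_answer s (answer s)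

-- ===== LEMMAS AND PROOFS =====

-- greedy non-overlapping occurrence count (the recursion behind CPython's str.count)
def cnt : List Char → List Char → Nat
  | _, [] => 0
  | [], _ :: _ => 0
  | ph :: pt, h :: t =>
    if (ph :: pt).isPrefixOf (h :: t) then 1 + cnt (ph :: pt) (t.drop pt.length)
    else cnt (ph :: pt) t
termination_by _ l => l.length
decreasing_by
  · simp only [List.length_drop, List.length_cons]; omega
  · simp

lemma loopA_cons (cs : List Char) (L i : Nat) (rest : List Nat) :
    answerLoopA cs L (i :: rest) =
      if PySem.Chars.count cs (cs.take i) * (cs.take i).length = L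
      then ((PySem.Chars.count cs (cs.take i) : Nat) : Int)
      else answerLoopA cs L rest := rfl

lemma loopB_cons (cs : List Char) (L d : Nat) (rest : List Nat) :
    answerLoopB cs L (d :: rest) =
      if L % d = 0 ∧ cs = (List.replicate (L / d) (cs.take d)).flatten
      then ((L / d : Nat) : Int)
      else answerLoopB cs L rest := rfl

lemma count_go_eq_cnt (sub : List Char) (hsub : sub ≠ []) :
    ∀ (fuel : Nat) (l : List Char) (acc : Nat), l.length ≤ fuel →
      PySem.Chars.count.go sub fuel l acc = acc + cnt sub l := by
  intro fuel
  induction fuel with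
  | zero =>
    intro l acc hl
    have : l = [] := List.eq_nil_of_length_eq_zero (by omega)
    subst this
    simp [PySem.Chars.count.go, cnt]
  | succ n ih =>
    intro l acc hl
    match l with
    | [] => simp [PySem.Chars.count.go, cnt]
    | h :: t =>
      match sub, hsub with
      | sh :: st, _ =>
        simp only [PySem.Chars.count.go, cnt]
        by_cases hp : (sh :: st).isPrefixOf (h :: t)
        · simp only [hp, if_true]
          have hpre : (sh :: st) <+: (h :: t) := List.isPrefixOf_iff_prefix.mp hp
          have hlen : (sh :: st).length ≤ (h :: t).length := hpre.length_le
          have hd : List.drop (sh :: st).length (h :: t) = List.drop st.length t := by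
            simp [List.length_cons]
          have hlt : (List.drop st.length t).length ≤ n := by
            simp only [List.length_drop]
            simp only [List.length_cons] at hl
            omega
          rw [hd, ih _ _ hlt]
          omega
        · simp only [hp]
          have hl' : t.length ≤ n := by
            simp only [List.length_cons] at hl; omega
          exact ih t acc hl'

lemma count_eq_cnt (s sub : List Char) (hsub : sub ≠ []) :
    PySem.Chars.count s sub = cnt sub s := by
  have : sub.isEmpty = false := by simp [hsub]
  simp only [PySem.Chars.count, this, Bool.false_eq_true, if_false]
  simpa using count_go_eq_cnt sub hsub s.length s 0 (le_refl _)

lemma cnt_mul_le (p l : List Char) (hp : p ≠ []) : cnt p l * p.length ≤ l.length := by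
  induction p, l using cnt.induct with
  | case1 _ => simp [cnt]
  | case2 h t => simp at hp
  | case3 ph pt h t hpre ih =>
    simp only [cnt, hpre, if_true]
    have hpre' : (ph :: pt) <+: (h :: t) := List.isPrefixOf_iff_prefix.mp hpre
    have hlen : (ph :: pt).length ≤ (h :: t).length := hpre'.length_le
    have hrec := ih (by simp)
    simp only [List.length_drop, List.length_cons] at hrec hlen ⊢
    have hmul : (1 + cnt (ph :: pt) (t.drop pt.length)) * (pt.length + 1)
        = (pt.length + 1) + cnt (ph :: pt) (t.drop pt.length) * (pt.length + 1) := by ring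
    omega
  | case4 ph pt h t hpre ih =>
    simp only [cnt, hpre, Bool.false_eq_true, if_false]
    have hrec := ih (by simp)
    simp only [List.length_cons] at hrec ⊢
    omega

lemma cnt_rep (p : List Char) (hp : p ≠ []) (k : Nat) :
    cnt p ((List.replicate k p).flatten) = k := by
  induction k with
  | zero =>
    match p, hp with
    | ph :: pt, _ => simp [cnt]
  | succ n ih =>
    match p, hp with
    | ph :: pt, _ =>
      have hflat : (List.replicate (n + 1) (ph :: pt)).flatten
          = ph :: (pt ++ (List.replicate n (ph :: pt)).flatten) := by
        rw [List.replicate_succ, List.flatten_cons, List.cons_append]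
      rw [hflat]
      have hpre : (ph :: pt).isPrefixOf (ph :: (pt ++ (List.replicate n (ph :: pt)).flatten)) = true := by
        rw [List.isPrefixOf_iff_prefix]
        rw [← List.cons_append]
        exact List.prefix_append _ _
      simp only [cnt, hpre, if_true]
      rw [List.drop_left' rfl, ih]
      omega

lemma cnt_tile (p l : List Char) (hp : p ≠ []) (heq : cnt p l * p.length = l.length) :
    l = (List.replicate (cnt p l) p).flatten := by
  induction p, l using cnt.induct with
  | case1 _ => simp [cnt]
  | case2 h t => simp at hp
  | case3 ph pt h t hpre ih =>
    have hpre' : (ph :: pt) <+: (h :: t) := List.isPrefixOf_iff_prefix.mp hpre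
    have hlen : (ph :: pt).length ≤ (h :: t).length := hpre'.length_le
    simp only [cnt, hpre, if_true] at heq ⊢
    have hdlen : (t.drop pt.length).length = t.length - pt.length := by simp
    have heq' : cnt (ph :: pt) (t.drop pt.length) * (ph :: pt).length = (t.drop pt.length).length := by
      rw [hdlen]
      have hmul : (1 + cnt (ph :: pt) (t.drop pt.length)) * (ph :: pt).length
          = (ph :: pt).length + cnt (ph :: pt) (t.drop pt.length) * (ph :: pt).length := by ring
      simp only [List.length_cons] at heq hmul hlen ⊢
      omega
    have htile := ih (by simp) heq'
    have hsplit : (h :: t) = (ph :: pt) ++ t.drop pt.length := by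
      obtain ⟨r, hr⟩ := hpre'
      have : t.drop pt.length = r := by
        have := congrArg (List.drop (ph :: pt).length) hr
        rw [List.drop_left] at this
        simpa [List.length_cons] using this.symm
      rw [this, hr]
    rw [Nat.add_comm 1 (cnt (ph :: pt) (t.drop pt.length)), List.replicate_succ,
        List.flatten_cons]
    conv_lhs => rw [hsplit, htile]
  | case4 ph pt h t hpre ih =>
    simp only [cnt, hpre, Bool.false_eq_true, if_false] at heq ⊢
    have hb := cnt_mul_le (ph :: pt) t (by simp)
    have hpos : 1 ≤ cnt (ph :: pt) t := by
      rcases Nat.eq_zero_or_pos (cnt (ph :: pt) t) with h0 | h1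
      · rw [h0] at heq; simp at heq
      · exact h1
    simp only [List.length_cons] at heq hb
    omega

-- the per-index bridge: for 1 ≤ i ≤ L, A's count condition is exactly B's tiling condition,
-- and both produce L / i
lemma key (cs : List Char) (i : Nat) (h1 : 1 ≤ i) (h2 : i ≤ cs.length) :
    (PySem.Chars.count cs (cs.take i) * i = cs.length ↔
      (cs.length % i = 0 ∧ cs = (List.replicate (cs.length / i) (cs.take i)).flatten)) ∧
    (cs.length % i = 0 → cs = (List.replicate (cs.length / i) (cs.take i)).flatten →
      PySem.Chars.count cs (cs.take i) = cs.length / i) := by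
  have hplen : (cs.take i).length = i := by simp; omega
  have hp : cs.take i ≠ [] := by
    intro hnil
    have := congrArg List.length hnil
    rw [hplen] at this
    simp at this
    omega
  rw [count_eq_cnt cs (cs.take i) hp]
  have hrepval : ∀ k : Nat, cs = (List.replicate k (cs.take i)).flatten →
      cnt (cs.take i) cs = k := by
    intro k htile
    have := congrArg (cnt (cs.take i)) htile
    rw [this, cnt_rep (cs.take i) hp k]
  constructor
  · constructor
    · intro h
      have h' : cnt (cs.take i) cs * (cs.take i).length = cs.length := by rw [hplen]; exact h
      have htile := cnt_tile (cs.take i) cs hp h'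
      have hmod : cs.length % i = 0 := by
        rw [← h, Nat.mul_mod_left]
      have hq : cs.length / i = cnt (cs.take i) cs := by
        rw [← h, Nat.mul_div_cancel _ (by omega : 0 < i)]
      exact ⟨hmod, by rw [hq]; exact htile⟩
    · rintro ⟨hmod, htile⟩
      rw [hrepval _ htile]
      exact Nat.div_mul_cancel (Nat.dvd_of_mod_eq_zero hmod)
  · intro hmod htile
    exact hrepval _ htile

lemma loops_agree (cs : List Char) (hL : 1 ≤ cs.length) :
    ∀ is : List Nat, (∀ i ∈ is, 1 ≤ i ∧ i ≤ cs.length) →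
      answerLoopA cs cs.length is = answerLoopB cs cs.length (is ++ [cs.length]) := by
  intro is
  induction is with
  | nil =>
    intro _
    rw [List.nil_append, loopB_cons]
    have h1 : cs.length % cs.length = 0 := Nat.mod_self _
    have h2 : cs = (List.replicate (cs.length / cs.length) (cs.take cs.length)).flatten := by
      rw [Nat.div_self (by omega), List.take_length]
      simp
    rw [if_pos ⟨h1, h2⟩, Nat.div_self (by omega)]
    rfl
  | cons i rest ih =>
    intro hmem
    obtain ⟨hi1, hi2⟩ := hmem i (by simp)
    have hk := key cs i hi1 hi2
    have hplen : (cs.take i).length = i := by simp; omega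
    rw [List.cons_append, loopA_cons, loopB_cons, hplen]
    by_cases hc : PySem.Chars.count cs (cs.take i) * i = cs.length
    · have hB := hk.1.mp hc
      have hval := hk.2 hB.1 hB.2
      rw [if_pos hc, if_pos hB, hval]
    · have hB : ¬ (cs.length % i = 0 ∧ cs = (List.replicate (cs.length / i) (cs.take i)).flatten) :=
        fun hB => hc (hk.1.mpr hB)
      rw [if_neg hc, if_neg hB]
      exact ih (fun j hj => hmem j (by simp [hj]))

-- ===== VERDICT (by name: the statement is the Claim_ definition above) =====
theorem answer_spec : Claim_equal_answer := by
  intro s _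
  unfold Spec_answer answer answer_alt
  set cs := s.toList with hcs
  by_cases hL : cs.length = 0
  · have hnil : cs = [] := List.eq_nil_of_length_eq_zero hL
    rw [hnil]
    rfl
  · have hL1 : 1 ≤ cs.length := by omega
    have hlen : cs.length = (cs.length - 1) + 1 := by omega
    have hrange : List.range cs.length = 0 :: List.range' 1 (cs.length - 1) := by
      rw [List.range_eq_range']
      conv_lhs => rw [hlen]
      rw [List.range'_succ]
    have hrange' : List.range' 1 cs.length = List.range' 1 (cs.length - 1) ++ [cs.length] := by
      conv_lhs => rw [hlen]
      rw [List.range'_concat]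
      congr 2
      omega
    rw [hrange, hrange', loopA_cons]
    have hzero : ¬ (PySem.Chars.count cs (cs.take 0) * (cs.take 0).length = cs.length) := by
      simp only [List.take_zero, List.length_nil, Nat.mul_zero]
      omega
    rw [if_neg hzero]
    exact loops_agree cs hL1 (List.range' 1 (cs.length - 1))
      (fun i hi => by
        rw [List.mem_range'_1] at hi
        omega)
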